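-- pv_equiv track=rewrite | github.com/Ascendral/KlomboAGI | klomboagi/reasoning/arc_lines.py | _fill_v
-- ===== SOURCE A (Python) =====
-- def _fill_v(g,bg):
--     R,C=len(g),len(g[0]); r=[row[:] for row in g]
--     for c in range(C):
--         f=-1;l=-1;color=None
--         for i in range(R):
--             if g[i][c]!=bg:
--                 if f==-1: f=i;color=g[i][c]
--                 l=i
--         if f!=-1 and l!=f and color:
--             for i in range(f,l+1):
--                 if r[i][c]==bg: r[i][c]=color
--     return r
-- ===== SOURCE B (Python) =====
-- def _fill_v(g, bg):
--     # Streaming gap-flush: per column, walk down once; after the first non-bg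
--     # cell, buffer the indices of bg cells; whenever another non-bg cell is
--     # reached, flush the buffered gap with the first cell's color (if truthy).
--     # Trailing bg cells after the last non-bg cell are never flushed.
--     r = [row[:] for row in g]
--     for c in range(len(g[0])):
--         seen = False
--         color = None
--         pending = []
--         for i in range(len(g)):
--             v = g[i][c]
--             if v != bg:
--                 if not seen:
--                     seen = True
--                     color = v
--                 elif color:
--                     for j in pending:
--                         r[j][c] = color
--                 pending = []
--             elif seen:
--                 pending.append(i)
--     return r
-- ===== Notes on version B (the rewrite author's own statement) =====
-- stated objective: alternative
-- what changed: Replaces A's per-column endpoint scan (tracking first/last non-background rows, then a guarded fill over the whole f..l range) with a single streaming pass per column that buffers each run of background cells and flushes it with the first endpoint's color as soon as the next non-background cell is reached, dropping the trailing run.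
import Mathlib
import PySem

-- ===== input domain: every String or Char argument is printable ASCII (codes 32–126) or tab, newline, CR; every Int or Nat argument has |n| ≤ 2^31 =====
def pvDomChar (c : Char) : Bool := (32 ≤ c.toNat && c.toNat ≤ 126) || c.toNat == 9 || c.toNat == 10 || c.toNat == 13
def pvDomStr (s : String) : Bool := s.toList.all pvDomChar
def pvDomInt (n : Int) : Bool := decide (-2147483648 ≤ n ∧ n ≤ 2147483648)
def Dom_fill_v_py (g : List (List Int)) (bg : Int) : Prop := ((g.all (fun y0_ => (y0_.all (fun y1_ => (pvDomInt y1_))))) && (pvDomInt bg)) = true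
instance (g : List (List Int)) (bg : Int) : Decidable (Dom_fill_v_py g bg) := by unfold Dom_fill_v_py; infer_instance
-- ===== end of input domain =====

-- B replaces A's per-column (first,last,color) endpoint scan + guarded range fill by a single
-- streaming pass that buffers background runs and flushes each gap at the next non-background
-- cell (objective: alternative; same asymptotic cost).

-- ===== PORT A =====
-- literal port of A: one pass per column maintaining (f, l, color); then the guarded fill loop
def fill_v_py (g : List (List Int)) (bg : Int) : List (List Int) :=
  let R := g.length
  let C := (g.headD []).length
  (List.range C).foldl (fun r c =>
    let st : Int × Int × Option Int :=
      (List.range R).foldl (fun st i =>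
        if (g.getD i []).getD c 0 ≠ bg then
          if st.1 = -1 then ((i : Int), (i : Int), some ((g.getD i []).getD c 0))
          else (st.1, (i : Int), st.2.2)
        else st) (-1, -1, none)
    match st.2.2 with
    | some color =>
        if st.1 ≠ -1 ∧ st.2.1 ≠ st.1 ∧ color ≠ 0 then
          (PySem.List.pyRange st.1 (st.2.1 + 1) 1).foldl (fun r i =>
            if (r.getD i.toNat []).getD c 0 = bg then
              r.set i.toNat ((r.getD i.toNat []).set c color)
            else r) r
        else r
    | none => r) g

-- ===== PORT B =====
-- B-side helper: 'for j in pending: r[j][c] = color'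
def flushB (c : Nat) (color : Int) (r : List (List Int)) (pending : List Nat) : List (List Int) :=
  pending.foldl (fun r j => r.set j ((r.getD j []).set c color)) r

-- B-side helper: one step of the streaming pass; state = (seen, color, pending, r)
def stepB (g : List (List Int)) (bg : Int) (c : Nat)
    (s : Bool × Int × List Nat × List (List Int)) (i : Nat) :
    Bool × Int × List Nat × List (List Int) :=
  if (g.getD i []).getD c 0 ≠ bg then
    if s.1 = false then (true, (g.getD i []).getD c 0, [], s.2.2.2)
    else if s.2.1 ≠ 0 then (true, s.2.1, [], flushB c s.2.1 s.2.2.2 s.2.2.1)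
    else (true, s.2.1, [], s.2.2.2)
  else
    if s.1 then (s.1, s.2.1, s.2.2.1 ++ [i], s.2.2.2) else s

def fill_v_py_alt (g : List (List Int)) (bg : Int) : List (List Int) :=
  (List.range (g.headD []).length).foldl (fun r c =>
    ((List.range g.length).foldl (stepB g bg c) (false, 0, [], r)).2.2.2) g

-- ===== PRECONDITION & SPEC =====
-- Pre_ excludes exactly the inputs where A raises IndexError: the empty grid (g[0]) and
-- grids with a row shorter than the first row (g[i][c] out of range).
def Pre_fill_v_py (g : List (List Int)) (bg : Int) : Prop :=
  g ≠ [] ∧ ∀ row ∈ g, (g.headD []).length ≤ row.length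
instance (g : List (List Int)) (bg : Int) : Decidable (Pre_fill_v_py g bg) := by unfold Pre_fill_v_py; infer_instance
def pvWitness_fill_v_py : List (List Int) × Int := ([[1], [0], [2]], 0)
def Spec_fill_v_py (g : List (List Int)) (bg : Int) (out : List (List Int)) : Prop := out = fill_v_py_alt g bg
instance (g : List (List Int)) (bg : Int) (out : List (List Int)) : Decidable (Spec_fill_v_py g bg out) := by unfold Spec_fill_v_py; infer_instance

-- ===== CLAIM (what is proved, stated in full; the proofs are below) =====
def Claim_equal_fill_v_py : Prop := ∀ (g : List (List Int)) (bg : Int), Dom_fill_v_py g bg → Pre_fill_v_py g bg → Spec_fill_v_py g bg (fill_v_py g bg)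

-- ===== LEMMAS AND PROOFS =====

-- the cell g[i][c] as both ports read it (getD-total)
def pcell (g : List (List Int)) (c i : Nat) : Int := (g.getD i []).getD c 0

-- 'this cell is a non-background endpoint'
def phit (g : List (List Int)) (bg : Int) (c i : Nat) : Bool := decide (pcell g c i ≠ bg)

-- the single write r[i][c] = color
def writeB (c : Nat) (color : Int) (r : List (List Int)) (i : Nat) : List (List Int) :=
  r.set i ((r.getD i []).set c color)

def stepA (g : List (List Int)) (bg : Int) (c : Nat)
    (st : Int × Int × Option Int) (i : Nat) : Int × Int × Option Int :=
  if (g.getD i []).getD c 0 ≠ bg then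
    if st.1 = -1 then ((i : Int), (i : Int), some ((g.getD i []).getD c 0))
    else (st.1, (i : Int), st.2.2)
  else st

def doFill (bg : Int) (c : Nat) (f l color : Int) (r : List (List Int)) : List (List Int) :=
  (PySem.List.pyRange f (l + 1) 1).foldl (fun r i =>
    if (r.getD i.toNat []).getD c 0 = bg then
      r.set i.toNat ((r.getD i.toNat []).set c color)
    else r) r

def colA (g : List (List Int)) (bg : Int) (r : List (List Int)) (c : Nat) : List (List Int) :=
  let st := (List.range g.length).foldl (stepA g bg c) (-1, -1, none)
  match st.2.2 with
  | some color => if st.1 ≠ -1 ∧ st.2.1 ≠ st.1 ∧ color ≠ 0 then doFill bg c st.1 st.2.1 color r else r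
  | none => r

def colBs (g : List (List Int)) (bg : Int) (r : List (List Int)) (c : Nat) : List (List Int) :=
  ((List.range g.length).foldl (stepB g bg c) (false, 0, [], r)).2.2.2

theorem fill_v_py_eq_colA (g : List (List Int)) (bg : Int) :
    fill_v_py g bg = (List.range ((g.headD []).length)).foldl (colA g bg) g := rfl

theorem fill_v_py_alt_eq_colBs (g : List (List Int)) (bg : Int) :
    fill_v_py_alt g bg = (List.range ((g.headD []).length)).foldl (colBs g bg) g := rfl

-- ---------- generic fold lemmas ----------

theorem foldl_skip {α β : Type} (f : α → β → α) (p : β → Bool)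
    (h : ∀ s i, p i = false → f s i = s) :
    ∀ (L : List β) (s : α), L.foldl f s = (L.filter p).foldl f s := by
  intro L
  induction L with
  | nil => intro s; rfl
  | cons a t ih =>
      intro s
      by_cases hp : p a = true
      · simp [hp, List.foldl_cons, ih]
      · have hpf : p a = false := by simpa using hp
        simp [hpf, List.foldl_cons, h s a hpf, ih]

theorem pcell_foldl_pres {β : Type} (f : List (List Int) → β → List (List Int)) (c' i : Nat)
    (hf : ∀ r b, pcell (f r b) c' i = pcell r c' i) :
    ∀ (L : List β) (r : List (List Int)), pcell (L.foldl f r) c' i = pcell r c' i := by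
  intro L
  induction L with
  | nil => intro r; rfl
  | cons b L ih => intro r; rw [List.foldl_cons, ih, hf]

-- ---------- write lemmas ----------

theorem pcell_write_ne_row (c c' : Nat) (color : Int) (r : List (List Int)) (i j : Nat)
    (h : j ≠ i) : pcell (writeB c color r i) c' j = pcell r c' j := by
  simp [pcell, writeB, List.getD_eq_getElem?_getD,
    List.getElem?_set_ne (show i ≠ j from fun hh => h hh.symm)]

theorem pcell_write_ne_col (c c' : Nat) (hcc : c' ≠ c) (color : Int) (r : List (List Int))
    (i j : Nat) : pcell (writeB c color r i) c' j = pcell r c' j := by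
  by_cases hj : j = i
  · subst hj
    by_cases hi : j < r.length
    · simp [pcell, writeB, List.getD_eq_getElem?_getD, List.getElem?_set_self hi,
        List.getElem?_set_ne (show c ≠ c' from fun hh => hcc hh.symm)]
    · unfold writeB
      rw [List.set_eq_of_length_le (by omega)]
  · exact pcell_write_ne_row c c' color r i j hj

-- ---------- A-side characterisation ----------

theorem stepA_skip (g : List (List Int)) (bg : Int) (c : Nat) :
    ∀ s i, phit g bg c i = false → stepA g bg c s i = s := by
  intro s i h
  have hne : ¬ (g.getD i []).getD c 0 ≠ bg := by
    simpa [phit, pcell] using h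
  show (if (g.getD i []).getD c 0 ≠ bg then _ else s) = s
  rw [if_neg hne]

theorem foldl_lastInt :
    ∀ (t : List Nat) (l : Int),
      t.foldl (fun (_ : Int) (i : Nat) => (i : Int)) l = (t.getLast?).elim l (fun x => (x : Int)) := by
  intro t
  induction t with
  | nil => intro l; rfl
  | cons a t ih =>
      intro l
      cases t with
      | nil => simp
      | cons b u =>
          rw [List.foldl_cons, ih (a : Int), List.getLast?_cons_cons]
          cases hgl : (b :: u).getLast? with
          | none => exact absurd (List.getLast?_eq_none_iff.mp hgl) (by simp)
          | some x => rfl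

theorem foldl_stepA_hits (g : List (List Int)) (bg : Int) (c : Nat) :
    ∀ (t : List Nat), (∀ i ∈ t, phit g bg c i = true) →
      ∀ (f l : Int) (co : Option Int), f ≠ -1 →
        t.foldl (stepA g bg c) (f, l, co) = (f, t.foldl (fun (_ : Int) (i : Nat) => (i : Int)) l, co) := by
  intro t
  induction t with
  | nil => intro _ f l co _; rfl
  | cons a t ih =>
      intro hall f l co hf
      have ha : (g.getD a []).getD c 0 ≠ bg := by
        have := hall a (List.mem_cons_self ..)
        simpa [phit, pcell] using this
      have hstep : stepA g bg c (f, l, co) a = (f, (a : Int), co) := by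
        show (if (g.getD a []).getD c 0 ≠ bg then
                if (f, l, co).1 = -1 then _ else _
              else _) = _
        rw [if_pos ha, if_neg (show ¬ (f, l, co).1 = -1 from hf)]
      simp only [List.foldl_cons, hstep]
      exact ih (fun i hi => hall i (List.mem_cons_of_mem _ hi)) f (a : Int) co hf

-- conditional fill over a duplicate-free index list = unconditional writes on its bg sublist
theorem condfill_eq_writes (g : List (List Int)) (bg : Int) (c : Nat) (color : Int) :
    ∀ (M : List Nat) (r : List (List Int)), M.Nodup →
      (∀ i ∈ M, pcell r c i = pcell g c i) →
      M.foldl (fun r i => if pcell r c i = bg then writeB c color r i else r) r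
        = (M.filter (fun i => !phit g bg c i)).foldl (writeB c color) r := by
  intro M
  induction M with
  | nil => intro r _ _; rfl
  | cons a M ih =>
      intro r hnd hinv
      have ha : pcell r c a = pcell g c a := hinv a (List.mem_cons_self ..)
      by_cases hbg : pcell g c a = bg
      · have hfa : (!phit g bg c a) = true := by simp [phit, hbg]
        rw [List.foldl_cons, if_pos (by rw [ha]; exact hbg)]
        simp only [List.filter_cons, hfa, if_true]
        rw [List.foldl_cons]
        exact ih (writeB c color r a) hnd.of_cons (fun j hj => by
          rw [pcell_write_ne_row c c color r a j
            (fun hja => (List.nodup_cons.mp hnd).1 (hja ▸ hj)), hinv j (List.mem_cons_of_mem _ hj)])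
      · have hfa : (!phit g bg c a) = false := by simp [phit, hbg]
        rw [List.foldl_cons, if_neg (by rw [ha]; exact hbg)]
        simp only [List.filter_cons, hfa, Bool.false_eq_true, if_false]
        exact ih r hnd.of_cons (fun j hj => hinv j (List.mem_cons_of_mem _ hj))

-- ---------- B-side characterisation ----------

def firstSplit (g : List (List Int)) (bg : Int) (c : Nat) : List Nat → Option (Nat × List Nat)
  | [] => none
  | i :: L => if phit g bg c i then some (i, L) else firstSplit g bg c L

theorem B_start (g : List (List Int)) (bg : Int) (c : Nat) :
    ∀ (M : List Nat) (r : List (List Int)),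
      M.foldl (stepB g bg c) (false, 0, [], r)
        = (match firstSplit g bg c M with
           | none => (false, 0, ([] : List Nat), r)
           | some (h, rest) => rest.foldl (stepB g bg c) (true, pcell g c h, [], r)) := by
  intro M
  induction M with
  | nil => intro r; rfl
  | cons i L ih =>
      intro r
      by_cases hi : (g.getD i []).getD c 0 ≠ bg
      · have hph : phit g bg c i = true := by unfold phit pcell; exact decide_eq_true hi
        have hstep : stepB g bg c (false, 0, [], r) i
            = (true, (g.getD i []).getD c 0, [], r) := by
          show (if (g.getD i []).getD c 0 ≠ bg then _ else _) = _
          rw [if_pos hi]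
          rfl
        rw [List.foldl_cons, hstep]
        simp [firstSplit, hph, pcell]
      · have hph : phit g bg c i = false := by unfold phit pcell; exact decide_eq_false hi
        have hstep : stepB g bg c (false, 0, [], r) i = (false, 0, [], r) := by
          show (if (g.getD i []).getD c 0 ≠ bg then _ else _) = _
          rw [if_neg hi]; rfl
        rw [List.foldl_cons, hstep, ih]
        simp [firstSplit, hph]

theorem B_zero (g : List (List Int)) (bg : Int) (c : Nat) :
    ∀ (M : List Nat) (pending : List Nat) (r : List (List Int)),
      (M.foldl (stepB g bg c) (true, 0, pending, r)).2.2.2 = r := by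
  intro M
  induction M with
  | nil => intro pending r; rfl
  | cons i L ih =>
      intro pending r
      by_cases hi : (g.getD i []).getD c 0 ≠ bg
      · have hstep : stepB g bg c (true, 0, pending, r) i = (true, 0, [], r) := by
          show (if (g.getD i []).getD c 0 ≠ bg then _ else _) = _
          rw [if_pos hi]
          rfl
        rw [List.foldl_cons, hstep, ih]
      · have hstep : stepB g bg c (true, 0, pending, r) i = (true, 0, pending ++ [i], r) := by
          show (if (g.getD i []).getD c 0 ≠ bg then _ else _) = _
          rw [if_neg hi]; rfl
        rw [List.foldl_cons, hstep, ih]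

-- the indices B's stream flushes, given the pending buffer
def gapsFrom (g : List (List Int)) (bg : Int) (c : Nat) : List Nat → List Nat → List Nat
  | [], _ => []
  | i :: L, p => if phit g bg c i then p ++ gapsFrom g bg c L [] else gapsFrom g bg c L (p ++ [i])

theorem B_flush (g : List (List Int)) (bg : Int) (c : Nat) (co : Int) (hco : co ≠ 0) :
    ∀ (M : List Nat) (pending : List Nat) (r : List (List Int)),
      (M.foldl (stepB g bg c) (true, co, pending, r)).2.2.2
        = (gapsFrom g bg c M pending).foldl (writeB c co) r := by
  intro M
  induction M with
  | nil => intro pending r; rfl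
  | cons i L ih =>
      intro pending r
      by_cases hi : (g.getD i []).getD c 0 ≠ bg
      · have hph : phit g bg c i = true := by unfold phit pcell; exact decide_eq_true hi
        have hstep : stepB g bg c (true, co, pending, r) i
            = (true, co, [], flushB c co r pending) := by
          show (if (g.getD i []).getD c 0 ≠ bg then _ else _) = _
          rw [if_pos hi, if_neg (show ¬ ((true, co, pending, r).1 = false) by simp), if_pos hco]
        rw [List.foldl_cons, hstep, ih, gapsFrom, hph]
        simp only [if_true]
        rw [List.foldl_append]
        rfl
      · have hph : phit g bg c i = false := by unfold phit pcell; exact decide_eq_false hi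
        have hstep : stepB g bg c (true, co, pending, r) i
            = (true, co, pending ++ [i], r) := by
          show (if (g.getD i []).getD c 0 ≠ bg then _ else _) = _
          rw [if_neg hi]; rfl
        rw [List.foldl_cons, hstep, ih, gapsFrom, hph]; rfl

-- drop-trailing-non-hits
def dtl (g : List (List Int)) (bg : Int) (c : Nat) (M : List Nat) : List Nat :=
  ((M.reverse.dropWhile (fun i => !phit g bg c i)).reverse)

theorem dtl_cons_of_any (g : List (List Int)) (bg : Int) (c : Nat) (a : Nat) (L : List Nat)
    (h : ∃ x ∈ L, phit g bg c x = true) : dtl g bg c (a :: L) = a :: dtl g bg c L := by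
  unfold dtl
  rw [List.reverse_cons, List.dropWhile_append]
  have hne : L.reverse.dropWhile (fun i => !phit g bg c i) ≠ [] := by
    rw [Ne, List.dropWhile_eq_nil_iff]
    rcases h with ⟨x, hx, hpx⟩
    intro hall
    have := hall x (List.mem_reverse.mpr hx)
    simp [hpx] at this
  rw [if_neg (by simpa [List.isEmpty_iff] using hne)]
  simp

theorem dtl_cons_of_none (g : List (List Int)) (bg : Int) (c : Nat) (a : Nat) (L : List Nat)
    (h : ∀ x ∈ L, phit g bg c x = false) :
    dtl g bg c (a :: L) = if phit g bg c a then [a] else [] := by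
  unfold dtl
  rw [List.reverse_cons, List.dropWhile_append]
  have hnil : L.reverse.dropWhile (fun i => !phit g bg c i) = [] := by
    rw [List.dropWhile_eq_nil_iff]
    intro x hx
    simp [h x (List.mem_reverse.mp hx)]
  rw [if_pos (by simp [hnil])]
  cases hpa : phit g bg c a <;> simp [List.dropWhile, hpa]

theorem gaps_eq (g : List (List Int)) (bg : Int) (c : Nat) :
    ∀ (M : List Nat) (p : List Nat),
      gapsFrom g bg c M p
        = if M.any (phit g bg c) then p ++ (dtl g bg c M).filter (fun i => !phit g bg c i) else [] := by
  intro M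
  induction M with
  | nil => intro p; simp [gapsFrom]
  | cons i L ih =>
      intro p
      by_cases hi : phit g bg c i = true
      · rw [gapsFrom, if_pos hi, ih]
        by_cases hL : L.any (phit g bg c) = true
        · rcases List.any_eq_true.mp hL with ⟨x, hx, hpx⟩
          rw [if_pos hL, dtl_cons_of_any g bg c i L ⟨x, hx, hpx⟩,
            if_pos (by simp [List.any_cons, hi]), List.filter_cons_of_neg (by simp [hi])]
          simp
        · have hnone : ∀ x ∈ L, phit g bg c x = false := by
            intro x hx
            by_contra hc
            exact absurd (List.any_eq_true.mpr ⟨x, hx, by simpa using hc⟩) (by simpa using hL)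
          rw [if_neg (by simpa using hL), dtl_cons_of_none g bg c i L hnone,
            if_pos (by simp [List.any_cons, hi])]
          simp [hi]
      · rw [gapsFrom, if_neg hi, ih]
        by_cases hL : L.any (phit g bg c) = true
        · rcases List.any_eq_true.mp hL with ⟨x, hx, hpx⟩
          rw [if_pos hL, if_pos (by simp [List.any_cons, hL]),
            dtl_cons_of_any g bg c i L ⟨x, hx, hpx⟩,
            List.filter_cons_of_pos (by simp [hi])]
          simp
        · rw [if_neg hL, if_neg (by simp [List.any_cons, hi]; simpa using hL)]

-- firstSplit on an ascending range
theorem firstSplit_range' (g : List (List Int)) (bg : Int) (c : Nat) :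
    ∀ (n a : Nat),
      ((List.range' a n).filter (phit g bg c) = [] ∧ firstSplit g bg c (List.range' a n) = none)
      ∨ ∃ h, phit g bg c h = true ∧ a ≤ h ∧ h < a + n
          ∧ firstSplit g bg c (List.range' a n) = some (h, List.range' (h+1) (a + n - h - 1))
          ∧ (List.range' a n).filter (phit g bg c)
              = h :: (List.range' (h+1) (a + n - h - 1)).filter (phit g bg c) := by
  intro n
  induction n with
  | zero => intro a; left; simp [firstSplit]
  | succ n ih =>
      intro a
      rw [List.range'_succ]
      by_cases ha : phit g bg c a = true
      · right
        refine ⟨a, ha, le_refl a, by omega, ?_, ?_⟩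
        · rw [firstSplit, if_pos ha]
          have : a + (n + 1) - a - 1 = n := by omega
          rw [this]
        · rw [List.filter_cons_of_pos ha]
          have : a + (n + 1) - a - 1 = n := by omega
          rw [this]
      · rcases ih (a + 1) with ⟨hfil, hfs⟩ | ⟨h, hh, hge, hlt, hfs, hfl⟩
        · left
          constructor
          · rw [List.filter_cons_of_neg (by simpa using ha), hfil]
          · rw [firstSplit, if_neg (by simpa using ha), hfs]
        · right
          have harith : a + 1 + n - h - 1 = a + (n + 1) - h - 1 := by omega
          refine ⟨h, hh, by omega, by omega, ?_, ?_⟩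
          · rw [firstSplit, if_neg (by simpa using ha), hfs, harith]
          · rw [List.filter_cons_of_neg (by simpa using ha), hfl, harith]

-- dtl of an ascending range with last hit l
theorem dtl_range' (g : List (List Int)) (bg : Int) (c : Nat) :
    ∀ (k s l : Nat), ((List.range' s k).filter (phit g bg c)).getLast? = some l →
      s ≤ l ∧ dtl g bg c (List.range' s k) = List.range' s (l + 1 - s) := by
  intro k
  induction k with
  | zero => intro s l hl; simp at hl
  | succ k ih =>
      intro s l hl
      rw [List.range'_succ] at hl ⊢
      cases hT : (List.range' (s+1) k).filter (phit g bg c) with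
      | nil =>
          have hnone : ∀ x ∈ List.range' (s+1) k, phit g bg c x = false := by
            intro x hx
            by_contra hc
            have : x ∈ (List.range' (s+1) k).filter (phit g bg c) :=
              List.mem_filter.mpr ⟨hx, by simpa using hc⟩
            rw [hT] at this; simp at this
          by_cases hs : phit g bg c s = true
          · have : (s :: List.range' (s+1) k).filter (phit g bg c) = [s] := by
              rw [List.filter_cons_of_pos hs, hT]
            rw [this] at hl
            simp at hl
            subst hl
            refine ⟨le_refl s, ?_⟩
            rw [dtl_cons_of_none g bg c s _ hnone, if_pos hs]
            have : s + 1 - s = 1 := by omega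
            rw [this, List.range'_one]
          · exfalso
            rw [List.filter_cons_of_neg (by simpa using hs), hT] at hl
            simp at hl
      | cons b tb =>
          have hl' : ((List.range' (s+1) k).filter (phit g bg c)).getLast? = some l := by
            by_cases hs : phit g bg c s = true
            · rw [List.filter_cons_of_pos hs, hT] at hl
              rw [hT]
              rwa [List.getLast?_cons_cons] at hl
            · rwa [List.filter_cons_of_neg (by simpa using hs)] at hl
          rcases ih (s+1) l hl' with ⟨hsl, hdtl⟩
          have hb : b ∈ (List.range' (s+1) k).filter (phit g bg c) := by rw [hT]; exact List.mem_cons_self ..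
          have hany : ∃ x ∈ List.range' (s+1) k, phit g bg c x = true := by
            rcases List.mem_filter.mp hb with ⟨hm, hp⟩
            exact ⟨b, hm, hp⟩
          refine ⟨by omega, ?_⟩
          rw [dtl_cons_of_any g bg c s _ hany, hdtl]
          have h1 : l + 1 - (s + 1) = l - s := by omega
          have h2 : l + 1 - s = (l - s) + 1 := by omega
          rw [h1, h2, List.range'_succ]

-- other columns are untouched by colA
theorem colA_pcell_other (g : List (List Int)) (bg : Int) (c c' : Nat) (hcc : c' ≠ c) :
    ∀ (r : List (List Int)) (j : Nat), pcell (colA g bg r c) c' j = pcell r c' j := by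
  intro r j
  simp only [colA]
  generalize ((List.range g.length).foldl (stepA g bg c) (-1, -1, none)) = st
  obtain ⟨f, l, co⟩ := st
  cases co with
  | none => rfl
  | some color =>
      simp only []
      split_ifs with hcond
      · unfold doFill
        refine pcell_foldl_pres _ c' j ?_ _ r
        intro r' i
        by_cases hc : (r'.getD i.toNat []).getD c 0 = bg
        · rw [if_pos hc]
          exact pcell_write_ne_col c c' hcc color r' i.toNat j
        · rw [if_neg hc]
      · rfl

-- the per-column equivalence
theorem colA_eq_colBs (g : List (List Int)) (bg : Int) (c : Nat)
    (r : List (List Int)) (hinv : ∀ i, pcell r c i = pcell g c i) :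
    colA g bg r c = colBs g bg r c := by
  unfold colA colBs
  rw [List.range_eq_range']
  rw [foldl_skip (stepA g bg c) (phit g bg c) (stepA_skip g bg c),
    B_start g bg c]
  rcases firstSplit_range' g bg c g.length 0 with ⟨hfil, hfs⟩ | ⟨h, hh, _, hltR, hfs, hfl⟩
  · rw [hfil, hfs]
    rfl
  · rw [hfl, hfs]
    have hhcell : (g.getD h []).getD c 0 ≠ bg := by
      have := hh; simp [phit, pcell] at this; exact this
    set rest := List.range' (h+1) (0 + g.length - h - 1) with hrest
    set t := rest.filter (phit g bg c) with ht
    have hstep1 : stepA g bg c (-1, -1, none) h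
        = ((h : Int), (h : Int), some ((g.getD h []).getD c 0)) := by
      show (if (g.getD h []).getD c 0 ≠ bg then
              if ((-1 : Int), (-1 : Int), (none : Option Int)).1 = -1 then
                ((h : Int), (h : Int), some ((g.getD h []).getD c 0))
              else _
            else _) = _
      rw [if_pos hhcell, if_pos rfl]
    have hthits : ∀ i ∈ t, phit g bg c i = true := by
      intro i hi; exact (List.mem_filter.mp (ht ▸ hi)).2
    rw [List.foldl_cons, hstep1,
      foldl_stepA_hits g bg c t hthits _ _ _ (by omega), foldl_lastInt]
    simp only []
    by_cases hc0 : (g.getD h []).getD c 0 = 0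
    · rw [if_neg (by rw [hc0]; intro hcond; exact hcond.2.2 rfl)]
      have : pcell g c h = 0 := hc0
      rw [show pcell g c h = (0 : Int) from this, B_zero]
    · rw [B_flush g bg c _ (by simpa [pcell] using hc0), gaps_eq]
      cases hgl : t.getLast? with
      | none =>
          have htnil : t = [] := List.getLast?_eq_none_iff.mp hgl
          have hnoany : rest.any (phit g bg c) = false := by
            by_contra hc
            rcases List.any_eq_true.mp (by simpa using hc) with ⟨x, hx, hpx⟩
            have hxm : x ∈ t := by rw [ht]; exact List.mem_filter.mpr ⟨hx, hpx⟩
            rw [htnil] at hxm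
            simp at hxm
          rw [if_neg (show ¬ (rest.any (phit g bg c) = true) by simp [hnoany])]
          simp
      | some l =>
          have hlmem : l ∈ t := List.mem_of_getLast? hgl
          have hlf : l ∈ rest.filter (phit g bg c) := by rw [← ht]; exact hlmem
          have hlrest : l ∈ rest := (List.mem_filter.mp hlf).1
          have hlph : phit g bg c l = true := (List.mem_filter.mp hlf).2
          have hany : rest.any (phit g bg c) = true :=
            List.any_eq_true.mpr ⟨l, hlrest, hlph⟩
          rcases dtl_range' g bg c (0 + g.length - h - 1) (h+1) l
              (by rw [← hrest, ← ht]; exact hgl) with ⟨hsl, hdtl⟩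
          rw [← hrest] at hdtl
          rw [if_pos hany]
          simp only [Option.elim_some, List.nil_append]
          rw [if_pos ⟨by omega, by omega, hc0⟩]
          rw [hdtl]
          have harr : l + 1 - (h + 1) = l - h := by omega
          rw [harr]
          unfold doFill
          rw [PySem.List.pyRange_one]
          have hn : (((l : Nat) : Int) + 1 - ((h : Nat) : Int)).toNat = (l - h) + 1 := by omega
          rw [hn, List.foldl_map]
          have hcast : ∀ k : Nat, (((h : Nat) : Int) + ((k : Nat) : Int)).toNat = h + k := by
            intro k; omega
          simp only [hcast]
          have hconv : ∀ (F : List (List Int) → Nat → List (List Int))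
              (init : List (List Int)) (n : Nat),
              (List.range n).foldl (fun a k => F a (h + k)) init
                = (List.range' h n).foldl F init := by
            intro F init n
            rw [List.range'_eq_map_range, List.foldl_map]
          rw [hconv (fun r i =>
            if (r.getD i []).getD c 0 = bg then r.set i ((r.getD i []).set c ((g.getD h []).getD c 0)) else r) r ((l - h) + 1)]
          have hmain := condfill_eq_writes g bg c ((g.getD h []).getD c 0)
            (List.range' h ((l - h) + 1)) r (List.nodup_range' 1) (fun i _ => hinv i)
          rw [show (List.range' h ((l - h) + 1)).foldl (fun r i =>
              if (r.getD i []).getD c 0 = bg then r.set i ((r.getD i []).set c ((g.getD h []).getD c 0)) else r) r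
            = (List.range' h ((l - h) + 1)).foldl (fun r i =>
              if pcell r c i = bg then writeB c ((g.getD h []).getD c 0) r i else r) r from rfl]
          rw [hmain, List.range'_succ, List.filter_cons_of_neg (by simp [hh])]
          rfl

-- outer fold: processing distinct columns left to right, with untouched columns still agreeing with g
theorem foldl_cols_eq (g : List (List Int)) (bg : Int) :
    ∀ (L : List Nat) (r : List (List Int)), L.Nodup →
      (∀ c ∈ L, ∀ i, pcell r c i = pcell g c i) →
      L.foldl (colA g bg) r = L.foldl (colBs g bg) r := by
  intro L
  induction L with
  | nil => intro r _ _; rfl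
  | cons c L ih =>
      intro r hnd hq
      have h1 : colA g bg r c = colBs g bg r c :=
        colA_eq_colBs g bg c r (hq c (List.mem_cons_self ..))
      rw [List.foldl_cons, List.foldl_cons, ← h1]
      refine ih (colA g bg r c) hnd.of_cons ?_
      intro c' hc' i
      have hcc : c' ≠ c := fun hce => (List.nodup_cons.mp hnd).1 (hce ▸ hc')
      rw [colA_pcell_other g bg c c' hcc r i, hq c' (List.mem_cons_of_mem _ hc') i]

theorem ab_eq (g : List (List Int)) (bg : Int) : fill_v_py g bg = fill_v_py_alt g bg := by
  rw [fill_v_py_eq_colA, fill_v_py_alt_eq_colBs]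
  exact foldl_cols_eq g bg (List.range ((g.headD []).length)) g (List.nodup_range)
    (fun c _ i => rfl)

-- ===== VERDICT (by name: the statement is the Claim_ definition above) =====
theorem fill_v_py_spec : Claim_equal_fill_v_py := by
  intro g bg _ _
  unfold Spec_fill_v_py
  exact ab_eq g bg
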